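-- pv_equiv track=rewrite | github.com/hlgsdx/tjs2-decompiler | tjs2_formatting.py | _separate_multiline_stmts
-- ===== SOURCE A (Python) =====
-- def _separate_multiline_stmts(lines):
--     depth = 0
--     line_info = []
--     for line in lines:
--         s = line.strip()
--         opens = _count_structural_braces(line, '{')
--         closes = _count_structural_braces(line, '}')
--         if s.startswith('}'):
--             line_depth = max(0, depth - closes)
--         else:
--             line_depth = depth
--         new_depth = max(0, depth + opens - closes)
--         line_info.append((line_depth, new_depth, s, opens))
--         depth = new_depth
--
--     max_depth = max((info[1] for info in line_info), default=0) + 1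
--     stmt_start = [-1] * (max_depth + 1)
--     stmts = []
--
--     for i, (line_depth, new_depth, s, opens) in enumerate(line_info):
--         if s == '':
--             d = line_depth
--             if stmt_start[d] >= 0:
--                 stmts.append((stmt_start[d], i - 1, d))
--                 stmt_start[d] = -1
--             continue
--
--         if stmt_start[line_depth] < 0:
--             stmt_start[line_depth] = i
--
--         is_terminating = (s.endswith(';') or s.endswith('{ }') or
--                           s == '}' or (s.endswith('}') and opens == 0))
--         if is_terminating and stmt_start[new_depth] >= 0:
--             stmts.append((stmt_start[new_depth], i, new_depth))
--             stmt_start[new_depth] = -1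
--
--     for d in range(max_depth + 1):
--         if stmt_start[d] >= 0:
--             stmts.append((stmt_start[d], len(lines) - 1, d))
--
--     stmts.sort()
--
--     from collections import defaultdict
--     by_depth = defaultdict(list)
--     for start, end, d in stmts:
--         by_depth[d].append((start, end))
--
--     insert_before = set()
--     for d, depth_stmts in by_depth.items():
--         depth_stmts.sort()
--         for j in range(1, len(depth_stmts)):
--             prev_s, prev_e = depth_stmts[j - 1]
--             curr_s, curr_e = depth_stmts[j]
--
--             if curr_s > prev_e + 1:
--                 continue
--
--             prev_len = prev_e - prev_s + 1
--             curr_len = curr_e - curr_s + 1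
--
--             if (prev_len >= 3 or curr_len >= 3) and d == 0:
--                 insert_before.add(curr_s)
--
--     result = []
--     for i, line in enumerate(lines):
--         if i in insert_before:
--             result.append('')
--         result.append(line)
--
--     return result
--
-- def _count_structural_braces(line, brace_char):
--     count = 0
--     in_string = None
--     i = 0
--     s = line
--     while i < len(s):
--         ch = s[i]
--         if in_string:
--             if ch == '\\':
--                 i += 2
--                 continue
--             if ch == in_string:
--                 in_string = None
--         else:
--             if ch == '/' and i + 1 < len(s) and s[i+1] == '/':
--                 break
--             if ch == '"' or ch == "'":
--                 in_string = ch
--             elif ch == brace_char: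
--                 count += 1
--         i += 1
--     return count
-- ===== SOURCE B (Python) =====
-- def _count_structural_braces(line, brace_char):
--     count = 0
--     in_string = None
--     i = 0
--     s = line
--     while i < len(s):
--         ch = s[i]
--         if in_string:
--             if ch == '\\':
--                 i += 2
--                 continue
--             if ch == in_string:
--                 in_string = None
--         else:
--             if ch == '/' and i + 1 < len(s) and s[i+1] == '/':
--                 break
--             if ch == '"' or ch == "'":
--                 in_string = ch
--             elif ch == brace_char:
--                 count += 1
--         i += 1
--     return count
--
--
-- def _separate_multiline_stmts(lines):
--     # One pass tracking only top-level (depth-0) statements; no per-depth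
--     # array, no sorting, no grouping.
--     depth = 0
--     stmt_start0 = -1          # start of the currently open top-level statement
--     top_stmts = []            # ordered (start, end) pairs at depth 0
--     for i, line in enumerate(lines):
--         s = line.strip()
--         opens = _count_structural_braces(line, '{')
--         closes = _count_structural_braces(line, '}')
--         if s.startswith('}'):
--             line_depth = max(0, depth - closes)
--         else:
--             line_depth = depth
--         new_depth = max(0, depth + opens - closes)
--         if s == '':
--             if line_depth == 0 and stmt_start0 >= 0:
--                 top_stmts.append((stmt_start0, i - 1))
--                 stmt_start0 = -1
--         else:
--             if line_depth == 0 and stmt_start0 < 0: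
--                 stmt_start0 = i
--             terminating = (s.endswith(';') or s.endswith('{ }') or
--                            s == '}' or (s.endswith('}') and opens == 0))
--             if terminating and new_depth == 0 and stmt_start0 >= 0:
--                 top_stmts.append((stmt_start0, i))
--                 stmt_start0 = -1
--         depth = new_depth
--     if stmt_start0 >= 0:
--         top_stmts.append((stmt_start0, len(lines) - 1))
--
--     insert_before = []
--     for j in range(1, len(top_stmts)):
--         prev_s, prev_e = top_stmts[j - 1]
--         curr_s, curr_e = top_stmts[j]
--         if curr_s <= prev_e + 1 and (prev_e - prev_s >= 2 or curr_e - curr_s >= 2):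
--             insert_before.append(curr_s)
--
--     result = []
--     for i, line in enumerate(lines):
--         if i in insert_before:
--             result.append('')
--         result.append(line)
--     return result
-- ===== Notes on version B (the rewrite author's own statement) =====
-- stated objective: simpler
-- what changed: B replaces A's per-depth statement array, the global sort, and the defaultdict grouping by a single pass that tracks only the one top-level (depth-0) statement that can be open, since only depth-0 statements ever cause an inserted blank line.
import Mathlib
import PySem

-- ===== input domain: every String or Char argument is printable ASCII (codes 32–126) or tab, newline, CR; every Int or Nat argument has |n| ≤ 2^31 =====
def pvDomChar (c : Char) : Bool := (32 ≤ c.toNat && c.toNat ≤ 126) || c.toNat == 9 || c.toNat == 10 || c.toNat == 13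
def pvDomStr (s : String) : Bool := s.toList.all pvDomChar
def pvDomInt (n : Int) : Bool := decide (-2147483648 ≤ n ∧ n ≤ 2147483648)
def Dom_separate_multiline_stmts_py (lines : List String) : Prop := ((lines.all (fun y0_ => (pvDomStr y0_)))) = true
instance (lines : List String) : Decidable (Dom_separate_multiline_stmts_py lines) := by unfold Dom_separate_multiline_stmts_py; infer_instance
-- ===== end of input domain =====

-- B replaces A's per-depth statement array, the global sort and the defaultdict grouping by a
-- single pass tracking only the one top-level (depth-0) statement, which is all the insertion
-- rule ever uses; objective: simpler.

-- ===== PORT A =====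
-- shared helper: both Pythons contain the identical _count_structural_braces
def csbGo (brace : Char) : Option Char → List Char → Int
  | _, [] => 0
  | some q, c :: rest =>
    if c = '\\' then
      match rest with
      | [] => 0
      | _ :: r => csbGo brace (some q) r
    else if c = q then csbGo brace none rest
    else csbGo brace (some q) rest
  | none, c :: rest =>
    if c = '/' ∧ rest.head? = some '/' then 0
    else if c = '"' ∨ c = '\'' then csbGo brace (some c) rest
    else if c = brace then 1 + csbGo brace none rest
    else csbGo brace none rest

def countStructuralBraces (line : String) (brace : Char) : Int :=
  csbGo brace none line.toList

-- first loop of A: build line_info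
def aInfoStep (st : Int × List (Int × Int × String × Int)) (line : String) :
    Int × List (Int × Int × String × Int) :=
  let depth := st.1
  let s := PySem.Str.strip line
  let opens := countStructuralBraces line '{'
  let closes := countStructuralBraces line '}'
  let line_depth := if PySem.Str.startswith s "}" = true then max 0 (depth - closes) else depth
  let new_depth := max 0 (depth + opens - closes)
  (new_depth, st.2 ++ [(line_depth, new_depth, s, opens)])

-- second loop of A: the per-depth stmt_start array and collected stmts
def aStmtStep (st : List Int × List (Int × Int × Int)) (p : Int × Int × Int × String × Int) :
    List Int × List (Int × Int × Int) :=
  let i := p.1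
  let line_depth := p.2.1
  let new_depth := p.2.2.1
  let s := p.2.2.2.1
  let opens := p.2.2.2.2
  if s = "" then
    let d := line_depth
    if 0 ≤ PySem.List.pyGetD st.1 d (-1) then
      (PySem.List.pySetD st.1 d (-1), st.2 ++ [(PySem.List.pyGetD st.1 d (-1), i - 1, d)])
    else st
  else
    let ss1 := if PySem.List.pyGetD st.1 line_depth (-1) < 0 then PySem.List.pySetD st.1 line_depth i else st.1
    let term := PySem.Str.endswith s ";" || PySem.Str.endswith s "{ }" || decide (s = "}") ||
                (PySem.Str.endswith s "}" && decide (opens = 0))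
    if term = true ∧ 0 ≤ PySem.List.pyGetD ss1 new_depth (-1) then
      (PySem.List.pySetD ss1 new_depth (-1), st.2 ++ [(PySem.List.pyGetD ss1 new_depth (-1), i, new_depth)])
    else (ss1, st.2)

-- EOF flush loop of A
def aFlushStep (ss : List Int) (n : Int) (stmts : List (Int × Int × Int)) (d : Int) :
    List (Int × Int × Int) :=
  if 0 ≤ PySem.List.pyGetD ss d (-1) then stmts ++ [(PySem.List.pyGetD ss d (-1), n - 1, d)]
  else stmts

-- defaultdict(list) grouping by depth
def aGroupStep (bd : PySem.Dict Int (List (Int × Int))) (t : Int × Int × Int) :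
    PySem.Dict Int (List (Int × Int)) :=
  bd.modify t.2.2 [] (fun l => l ++ [(t.1, t.2.1)])

-- inner loop over j in range(1, len(depth_stmts))
def aInsStep (dpt : Int) (ds : List (Int × Int)) (ib : PySem.Set Int) (j : Int) : PySem.Set Int :=
  let prev := PySem.List.pyGetD ds (j - 1) ((0 : Int), (0 : Int))
  let curr := PySem.List.pyGetD ds j ((0 : Int), (0 : Int))
  if prev.2 + 1 < curr.1 then ib
  else if (decide (3 ≤ prev.2 - prev.1 + 1) || decide (3 ≤ curr.2 - curr.1 + 1)) && decide (dpt = 0) then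
    PySem.Set.add ib curr.1
  else ib

-- loop over by_depth.items()
def aItemStep (ib : PySem.Set Int) (it : Int × List (Int × Int)) : PySem.Set Int :=
  -- depth_stmts.sort(): starts are pairwise distinct, so the stable sort by start
  -- coincides with Python's lexicographic pair sort
  let ds := PySem.List.sorted it.2 (fun q => q.1) false
  (PySem.List.pyRange 1 (ds.length : Int) 1).foldl (aInsStep it.1 ds) ib

-- final result loop of A
def aResStep (ib : PySem.Set Int) (res : List String) (p : Int × String) : List String :=
  (if PySem.Set.contains ib p.1 then res ++ [""] else res) ++ [p.2]

def aInsertBefore (lines : List String) : PySem.Set Int :=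
  let line_info := (lines.foldl aInfoStep (0, [])).2
  let max_depth := (PySem.List.max? (line_info.map (fun info => info.2.1)) (fun x => x)).getD 0 + 1
  let st2 := (PySem.List.enumerate line_info 0).foldl aStmtStep
               (List.replicate (max_depth + 1).toNat (-1), [])
  let stmts := (PySem.List.pyRange 0 (max_depth + 1) 1).foldl
                 (aFlushStep st2.1 (lines.length : Int)) st2.2
  -- stmts.sort(): all statement start lines are distinct, so Python's lexicographic
  -- tuple sort coincides with the stable sort by start alone
  let stmtsSorted := PySem.List.sorted stmts (fun t => t.1) false
  let by_depth := stmtsSorted.foldl aGroupStep PySem.Dict.empty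
  by_depth.items.foldl aItemStep PySem.Set.empty

def separate_multiline_stmts_py (lines : List String) : List String :=
  (PySem.List.enumerate lines 0).foldl (aResStep (aInsertBefore lines)) []

-- ===== PORT B =====
-- single pass of B: depth, the one open top-level statement start, closed top-level stmts
def bStep (st : Int × Int × List (Int × Int)) (p : Int × String) : Int × Int × List (Int × Int) :=
  let i := p.1
  let line := p.2
  let depth := st.1
  let stmt0 := st.2.1
  let tops := st.2.2
  let s := PySem.Str.strip line
  let opens := countStructuralBraces line '{'
  let closes := countStructuralBraces line '}'
  let line_depth := if PySem.Str.startswith s "}" = true then max 0 (depth - closes) else depth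
  let new_depth := max 0 (depth + opens - closes)
  if s = "" then
    if line_depth = 0 ∧ 0 ≤ stmt0 then (new_depth, -1, tops ++ [(stmt0, i - 1)])
    else (new_depth, stmt0, tops)
  else
    let stmt0' := if line_depth = 0 ∧ stmt0 < 0 then i else stmt0
    let term := PySem.Str.endswith s ";" || PySem.Str.endswith s "{ }" || decide (s = "}") ||
                (PySem.Str.endswith s "}" && decide (opens = 0))
    if term = true ∧ new_depth = 0 ∧ 0 ≤ stmt0' then (new_depth, -1, tops ++ [(stmt0', i)])
    else (new_depth, stmt0', tops)

-- pairwise scan over consecutive top-level statements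
def bInsStep (tops : List (Int × Int)) (acc : List Int) (j : Int) : List Int :=
  let prev := PySem.List.pyGetD tops (j - 1) ((0 : Int), (0 : Int))
  let curr := PySem.List.pyGetD tops j ((0 : Int), (0 : Int))
  if curr.1 ≤ prev.2 + 1 ∧ (2 ≤ prev.2 - prev.1 ∨ 2 ≤ curr.2 - curr.1) then acc ++ [curr.1]
  else acc

-- rebuild with blank lines inserted
def bResStep (ib : List Int) (res : List String) (p : Int × String) : List String :=
  (if ib.contains p.1 then res ++ [""] else res) ++ [p.2]

def bInsertBefore (lines : List String) : List Int :=
  let fin := (PySem.List.enumerate lines 0).foldl bStep (0, -1, [])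
  let tops := if 0 ≤ fin.2.1 then fin.2.2 ++ [(fin.2.1, (lines.length : Int) - 1)] else fin.2.2
  (PySem.List.pyRange 1 (tops.length : Int) 1).foldl (bInsStep tops) []

def separate_multiline_stmts_py_alt (lines : List String) : List String :=
  (PySem.List.enumerate lines 0).foldl (bResStep (bInsertBefore lines)) []

-- ===== PRECONDITION & SPEC =====
def Spec_separate_multiline_stmts_py (lines : List String) (out : List String) : Prop := out = separate_multiline_stmts_py_alt lines
instance (lines : List String) (out : List String) : Decidable (Spec_separate_multiline_stmts_py lines out) := by unfold Spec_separate_multiline_stmts_py; infer_instance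

-- ===== CLAIM (what is proved, stated in full; the proofs are below) =====
def Claim_equal_separate_multiline_stmts_py : Prop := ∀ (lines : List String), Dom_separate_multiline_stmts_py lines → Spec_separate_multiline_stmts_py lines (separate_multiline_stmts_py lines)

-- ===== LEMMAS AND PROOFS =====

-- reference recursion computing A's line_info (and the per-line values B recomputes)
def mkInfo : Int → List String → List (Int × Int × String × Int)
  | _, [] => []
  | depth, line :: rest =>
    let s := PySem.Str.strip line
    let opens := countStructuralBraces line '{'
    let closes := countStructuralBraces line '}'
    let ld := if PySem.Str.startswith s "}" = true then max 0 (depth - closes) else depth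
    let nd := max 0 (depth + opens - closes)
    (ld, nd, s, opens) :: mkInfo nd rest

-- B's per-entry transition (depth dropped)
def bEntryStep (st : Int × List (Int × Int)) (p : Int × Int × Int × String × Int) :
    Int × List (Int × Int) :=
  let i := p.1
  let ld := p.2.1
  let nd := p.2.2.1
  let s := p.2.2.2.1
  let opens := p.2.2.2.2
  if s = "" then
    if ld = 0 ∧ 0 ≤ st.1 then (-1, st.2 ++ [(st.1, i - 1)]) else st
  else
    let st0' := if ld = 0 ∧ st.1 < 0 then i else st.1
    let term := PySem.Str.endswith s ";" || PySem.Str.endswith s "{ }" || decide (s = "}") ||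
                (PySem.Str.endswith s "}" && decide (opens = 0))
    if term = true ∧ nd = 0 ∧ 0 ≤ st0' then (-1, st.2 ++ [(st0', i)]) else (st0', st.2)

lemma foldA1 (ls : List String) : ∀ (d : Int) (acc : List (Int × Int × String × Int)),
    (ls.foldl aInfoStep (d, acc)).2 = acc ++ mkInfo d ls := by
  induction ls with
  | nil => intro d acc; simp [mkInfo]
  | cons l r ih =>
    intro d acc
    simp only [List.foldl_cons, aInfoStep]
    rw [ih]
    simp [mkInfo]

lemma mkInfo_nonneg (ls : List String) : ∀ (d : Int), 0 ≤ d →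
    ∀ e ∈ mkInfo d ls, 0 ≤ e.1 ∧ 0 ≤ e.2.1 := by
  induction ls with
  | nil => intro d _ e he; simp [mkInfo] at he
  | cons l r ih =>
    intro d hd e he
    simp only [mkInfo, List.mem_cons] at he
    rcases he with he | he
    · subst he
      constructor
      · dsimp only
        split <;> simp [hd, le_max_iff] <;> omega
      · simp
    · exact ih _ (by positivity) e he
lemma foldB1 (ls : List String) : ∀ (k d st0 : Int) (tops : List (Int × Int)),
    ((PySem.List.enumerate ls k).foldl bStep (d, st0, tops)).2 =
      (PySem.List.enumerate (mkInfo d ls) k).foldl bEntryStep (st0, tops) := by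
  induction ls with
  | nil => intro k d st0 tops; simp [mkInfo, PySem.List.enumerate_nil]
  | cons l r ih =>
    intro k d st0 tops
    rw [show mkInfo d (l :: r) = _ from rfl]
    simp only [PySem.List.enumerate_cons, List.foldl_cons]
    have hstep : bStep (d, st0, tops) (k, l) =
        (max 0 (d + countStructuralBraces l '{' - countStructuralBraces l '}'),
         bEntryStep (st0, tops)
           (k, (if PySem.Str.startswith (PySem.Str.strip l) "}" = true
                  then max 0 (d - countStructuralBraces l '}') else d),
               max 0 (d + countStructuralBraces l '{' - countStructuralBraces l '}'),
               PySem.Str.strip l, countStructuralBraces l '{')) := by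
      simp only [bStep, bEntryStep]
      split_ifs <;> rfl
    rw [hstep, ih]
    simp [mkInfo, PySem.List.enumerate_cons]
lemma slot0_set_ne (ss : List Int) (d v : Int) (hd : 0 ≤ d) (hne : d ≠ 0) :
    PySem.List.pyGetD (PySem.List.pySetD ss d v) 0 (-1) = PySem.List.pyGetD ss 0 (-1) := by
  rw [PySem.List.pySetD_of_nonneg ss v hd, PySem.List.pyGetD_zero, PySem.List.pyGetD_zero]
  unfold List.getD
  rw [List.getElem?_set_ne (by omega)]

lemma slot0_set_self (ss : List Int) (v : Int) (h : 0 < ss.length) :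
    PySem.List.pyGetD (PySem.List.pySetD ss 0 v) 0 (-1) = v := by
  rw [PySem.List.pySetD_of_nonneg ss v le_rfl, PySem.List.pyGetD_zero]
  unfold List.getD
  simp [h]

lemma filter_app0 (stmts : List (Int × Int × Int)) (x y : Int) :
    (stmts ++ [(x, y, (0 : Int))]).filter (fun t => t.2.2 == 0) =
      stmts.filter (fun t => t.2.2 == 0) ++ [(x, y, (0 : Int))] := by
  simp

lemma filter_appne (stmts : List (Int × Int × Int)) (x y d : Int) (hd : d ≠ 0) :
    (stmts ++ [(x, y, d)]).filter (fun t => t.2.2 == 0) =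
      stmts.filter (fun t => t.2.2 == 0) := by
  simp [hd]

lemma pw_append (tops : List (Int × Int)) (x y : Int)
    (hpw : tops.Pairwise (fun a b => a.1 < b.1)) (hx : ∀ q ∈ tops, q.1 < x) :
    (tops ++ [(x, y)]).Pairwise (fun a b => a.1 < b.1) := by
  rw [List.pairwise_append]
  exact ⟨hpw, List.pairwise_singleton _ _, by simpa using hx⟩

def SimInv (k : Int) (ss : List Int) (stmts : List (Int × Int × Int))
    (st0 : Int) (tops : List (Int × Int)) : Prop :=
  0 < ss.length ∧
  PySem.List.pyGetD ss 0 (-1) = st0 ∧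
  stmts.filter (fun t => t.2.2 == 0) = tops.map (fun q => (q.1, q.2, (0 : Int))) ∧
  tops.Pairwise (fun a b => a.1 < b.1) ∧
  (∀ q ∈ tops, q.1 < k) ∧
  (0 ≤ st0 → st0 < k ∧ ∀ q ∈ tops, q.1 < st0)

lemma step_inv (k : Int) (ss : List Int) (stmts : List (Int × Int × Int)) (st0 : Int)
    (tops : List (Int × Int)) (e : Int × Int × String × Int)
    (he : 0 ≤ e.1 ∧ 0 ≤ e.2.1) (h : SimInv k ss stmts st0 tops) :
    SimInv (k + 1) (aStmtStep (ss, stmts) (k, e)).1 (aStmtStep (ss, stmts) (k, e)).2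
      (bEntryStep (st0, tops) (k, e)).1 (bEntryStep (st0, tops) (k, e)).2 := by
  obtain ⟨ld, nd, s, opens⟩ := e
  obtain ⟨hld0, hnd0⟩ := he
  simp only at hld0 hnd0
  obtain ⟨hlen, hslot, hfil, hpw, hlt, hopen⟩ := h
  by_cases hs : s = ""
  · subst hs
    by_cases hld : ld = 0
    · subst hld
      by_cases h0 : 0 ≤ st0
      · have hA : aStmtStep (ss, stmts) (k, ((0 : Int), nd, "", opens)) =
            (PySem.List.pySetD ss 0 (-1), stmts ++ [(st0, k - 1, 0)]) := by
          simp [aStmtStep, hslot, h0]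
        have hB : bEntryStep (st0, tops) (k, ((0 : Int), nd, "", opens)) =
            (-1, tops ++ [(st0, k - 1)]) := by
          simp [bEntryStep, h0]
        rw [hA, hB]
        refine ⟨by simpa [PySem.List.length_pySetD] using hlen,
          slot0_set_self ss (-1) hlen, ?_, ?_, ?_, by omega⟩
        · rw [filter_app0, hfil]; simp
        · exact pw_append _ _ _ hpw (hopen h0).2
        · intro q hq
          rcases List.mem_append.1 hq with hq | hq
          · exact lt_trans (hlt q hq) (by omega)
          · simp at hq; subst hq; exact lt_trans (hopen h0).1 (by omega)
      · have hA : aStmtStep (ss, stmts) (k, ((0 : Int), nd, "", opens)) = (ss, stmts) := by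
          simp [aStmtStep, hslot, h0]
        have hB : bEntryStep (st0, tops) (k, ((0 : Int), nd, "", opens)) = (st0, tops) := by
          simp [bEntryStep, h0]
        rw [hA, hB]
        exact ⟨hlen, hslot, hfil, hpw, fun q hq => lt_trans (hlt q hq) (by omega),
          fun h0' => ⟨lt_trans (hopen h0').1 (by omega), (hopen h0').2⟩⟩
    · have hB : bEntryStep (st0, tops) (k, (ld, nd, "", opens)) = (st0, tops) := by
        simp [bEntryStep, hld]
      rw [hB]
      by_cases hg : 0 ≤ PySem.List.pyGetD ss ld (-1)
      · have hA : aStmtStep (ss, stmts) (k, (ld, nd, "", opens)) =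
            (PySem.List.pySetD ss ld (-1), stmts ++ [(PySem.List.pyGetD ss ld (-1), k - 1, ld)]) := by
          simp [aStmtStep, hg]
        rw [hA]
        refine ⟨by simpa [PySem.List.length_pySetD] using hlen,
          by rw [slot0_set_ne ss ld (-1) hld0 hld]; exact hslot, ?_, hpw,
          fun q hq => lt_trans (hlt q hq) (by omega),
          fun h0' => ⟨lt_trans (hopen h0').1 (by omega), (hopen h0').2⟩⟩
        rw [filter_appne _ _ _ _ hld, hfil]
      · have hA : aStmtStep (ss, stmts) (k, (ld, nd, "", opens)) = (ss, stmts) := by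
          simp [aStmtStep, hg]
        rw [hA]
        exact ⟨hlen, hslot, hfil, hpw, fun q hq => lt_trans (hlt q hq) (by omega),
          fun h0' => ⟨lt_trans (hopen h0').1 (by omega), (hopen h0').2⟩⟩
  · -- nonblank line
    set st0' := if ld = 0 ∧ st0 < 0 then k else st0 with hst0'
    set ss1 := if PySem.List.pyGetD ss ld (-1) < 0 then PySem.List.pySetD ss ld k else ss with hss1
    have hlen1 : 0 < ss1.length := by
      rw [hss1]; split <;> simp [PySem.List.length_pySetD, hlen]
    have hslot1 : PySem.List.pyGetD ss1 0 (-1) = st0' := by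
      rw [hss1, hst0']
      by_cases hld : ld = 0
      · subst hld
        rw [hslot]
        by_cases h0 : st0 < 0
        · rw [if_pos h0, if_pos (show (0:Int) = 0 ∧ st0 < 0 from ⟨rfl, h0⟩)]
          exact slot0_set_self ss k hlen
        · simp only [if_neg h0]
          simp [h0, hslot]
      · have : ¬ (ld = 0 ∧ st0 < 0) := fun hc => hld hc.1
        rw [if_neg this]
        split
        · rw [slot0_set_ne ss ld k hld0 hld]; exact hslot
        · exact hslot
    have hopen1 : 0 ≤ st0' → st0' < k + 1 ∧ ∀ q ∈ tops, q.1 < st0' := by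
      rw [hst0']
      split
      · intro _; exact ⟨by omega, hlt⟩
      · intro h0'; exact ⟨lt_trans (hopen h0').1 (by omega), (hopen h0').2⟩
    set term := PySem.Str.endswith s ";" || PySem.Str.endswith s "{ }" || decide (s = "}") ||
                (PySem.Str.endswith s "}" && decide (opens = 0)) with hterm
    have hAs : aStmtStep (ss, stmts) (k, (ld, nd, s, opens)) =
        if term = true ∧ 0 ≤ PySem.List.pyGetD ss1 nd (-1) then
          (PySem.List.pySetD ss1 nd (-1), stmts ++ [(PySem.List.pyGetD ss1 nd (-1), k, nd)])
        else (ss1, stmts) := by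
      simp only [aStmtStep, hss1, hterm]
      rw [if_neg hs]
    have hBs : bEntryStep (st0, tops) (k, (ld, nd, s, opens)) =
        if term = true ∧ nd = 0 ∧ 0 ≤ st0' then (-1, tops ++ [(st0', k)])
        else (st0', tops) := by
      simp only [bEntryStep, hst0', hterm]
      rw [if_neg hs]
    rw [hAs, hBs]
    by_cases hnd : nd = 0
    · subst hnd
      rw [hslot1]
      by_cases hcl : term = true ∧ 0 ≤ st0'
      · rw [if_pos hcl, if_pos ⟨hcl.1, rfl, hcl.2⟩]
        refine ⟨by simpa [PySem.List.length_pySetD] using hlen1,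
          slot0_set_self ss1 (-1) hlen1, ?_, ?_, ?_, by omega⟩
        · rw [filter_app0, hfil]; simp
        · exact pw_append _ _ _ hpw (hopen1 hcl.2).2
        · intro q hq
          rcases List.mem_append.1 hq with hq | hq
          · exact lt_trans (hlt q hq) (by omega)
          · simp at hq; subst hq; exact (hopen1 hcl.2).1
      · have : ¬ (term = true ∧ (0 : Int) = 0 ∧ 0 ≤ st0') := by
          intro hc; exact hcl ⟨hc.1, hc.2.2⟩
        rw [if_neg hcl, if_neg this]
        exact ⟨hlen1, hslot1, hfil, hpw, fun q hq => lt_trans (hlt q hq) (by omega), hopen1⟩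
    · have hBno : ¬ (term = true ∧ nd = 0 ∧ 0 ≤ st0') := fun hc => hnd hc.2.1
      rw [if_neg hBno]
      by_cases hcl : term = true ∧ 0 ≤ PySem.List.pyGetD ss1 nd (-1)
      · rw [if_pos hcl]
        refine ⟨by simpa [PySem.List.length_pySetD] using hlen1,
          by rw [slot0_set_ne ss1 nd (-1) hnd0 hnd]; exact hslot1, ?_, hpw,
          fun q hq => lt_trans (hlt q hq) (by omega), hopen1⟩
        rw [filter_appne _ _ _ _ hnd, hfil]
      · rw [if_neg hcl]
        exact ⟨hlen1, hslot1, hfil, hpw, fun q hq => lt_trans (hlt q hq) (by omega), hopen1⟩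
lemma sim (infos : List (Int × Int × String × Int)) :
    ∀ (k : Int) (ss : List Int) (stmts : List (Int × Int × Int)) (st0 : Int)
      (tops : List (Int × Int)),
    (∀ e ∈ infos, 0 ≤ e.1 ∧ 0 ≤ e.2.1) → SimInv k ss stmts st0 tops →
    SimInv (k + infos.length)
      ((PySem.List.enumerate infos k).foldl aStmtStep (ss, stmts)).1
      ((PySem.List.enumerate infos k).foldl aStmtStep (ss, stmts)).2
      ((PySem.List.enumerate infos k).foldl bEntryStep (st0, tops)).1
      ((PySem.List.enumerate infos k).foldl bEntryStep (st0, tops)).2 := by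
  induction infos with
  | nil => intro k ss stmts st0 tops _ h; simpa [PySem.List.enumerate_nil] using h
  | cons e rest ih =>
    intro k ss stmts st0 tops hne h
    simp only [PySem.List.enumerate_cons, List.foldl_cons]
    have h1 := step_inv k ss stmts st0 tops e (hne e (by simp)) h
    have h2 := ih (k + 1) _ _ _ _ (fun e' he' => hne e' (by simp [he'])) h1
    have harr : (k + 1 + (rest.length : Int)) = k + ((e :: rest).length : Int) := by
      simp; omega
    rw [harr] at h2
    simpa using h2
lemma flush_zero_skip (ss : List Int) (n : Int) (l : List Int) (hl : ∀ d ∈ l, d ≠ 0) :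
    ∀ (acc : List (Int × Int × Int)),
    ((l.foldl (aFlushStep ss n) acc).filter (fun t => t.2.2 == 0)) =
      acc.filter (fun t => t.2.2 == 0) := by
  induction l with
  | nil => intro acc; rfl
  | cons d rest ih =>
    intro acc
    simp only [List.foldl_cons]
    rw [ih (fun x hx => hl x (by simp [hx]))]
    unfold aFlushStep
    split
    · rw [filter_appne _ _ _ _ (hl d (by simp))]
    · rfl

lemma flush_filter (ss : List Int) (n M : Int) (hM : 0 < M) (st0 : Int)
    (stmts : List (Int × Int × Int)) (tops : List (Int × Int))
    (h0 : PySem.List.pyGetD ss 0 (-1) = st0)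
    (hf : stmts.filter (fun t => t.2.2 == 0) = tops.map (fun q => (q.1, q.2, (0 : Int)))) :
    ((PySem.List.pyRange 0 M 1).foldl (aFlushStep ss n) stmts).filter (fun t => t.2.2 == 0) =
      (if 0 ≤ st0 then tops ++ [(st0, n - 1)] else tops).map (fun q => (q.1, q.2, (0 : Int))) := by
  rw [PySem.List.pyRange_one_cons hM, List.foldl_cons]
  rw [flush_zero_skip ss n _ (fun d hd => by
    have := (PySem.List.mem_pyRange_one).1 hd
    omega)]
  unfold aFlushStep
  rw [h0]
  split
  · rw [filter_app0, hf]; simp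
  · exact hf

lemma perm_le_lt_eq {α : Type} {κ : Type} [LinearOrder κ] (key : α → κ) :
    ∀ (l₂ l₁ : List α), l₁.Perm l₂ → l₁.Pairwise (fun a b => key a ≤ key b) →
      l₂.Pairwise (fun a b => key a < key b) → l₁ = l₂ := by
  intro l₂
  induction l₂ with
  | nil => intro l₁ hp _ _; exact List.length_eq_zero_iff.1 (by simpa using hp.length_eq)
  | cons y t ih =>
    intro l₁ hp h1 h2
    rcases l₁ with _ | ⟨x, s⟩
    · exact absurd hp.length_eq (by simp)
    have hxy : x = y := by
      have hxmem : x ∈ y :: t := hp.mem_iff.1 (by simp)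
      rcases List.mem_cons.1 hxmem with h | h
      · exact h
      · -- x ∈ t, so key y < key x; but y ∈ x :: s, so key x ≤ key y or y = x
        have hy : key y < key x := (List.pairwise_cons.1 h2).1 x h
        have hymem : y ∈ x :: s := hp.symm.mem_iff.1 (by simp)
        rcases List.mem_cons.1 hymem with h' | h'
        · exact h'.symm
        · have : key x ≤ key y := (List.pairwise_cons.1 h1).1 y h'
          exact absurd this (not_le.2 hy)
    subst hxy
    have hst : s.Perm t := hp.cons_inv
    rw [ih s hst (List.pairwise_cons.1 h1).2 (List.pairwise_cons.1 h2).2]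
lemma filter_sorted_eq (xs : List (Int × Int × Int))
    (h : (xs.filter (fun t => t.2.2 == 0)).Pairwise (fun a b => a.1 < b.1)) :
    (PySem.List.sorted xs (fun t => t.1) false).filter (fun t => t.2.2 == 0) =
      xs.filter (fun t => t.2.2 == 0) := by
  apply perm_le_lt_eq (fun t => t.1)
  · exact (PySem.List.sorted_perm xs _ _).filter _
  · exact List.Pairwise.sublist List.filter_sublist (PySem.List.sorted_pairwise xs _)
  · exact h

lemma foldl_const_set (l : List Int) (f : PySem.Set Int → Int → PySem.Set Int) :
    ∀ (acc : PySem.Set Int), (∀ acc x, x ∈ l → f acc x = acc) → l.foldl f acc = acc := by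
  induction l with
  | nil => intro acc _; rfl
  | cons x rest ih =>
    intro acc hf
    simp only [List.foldl_cons]
    rw [hf acc x (by simp)]
    exact ih acc (fun a y hy => hf a y (by simp [hy]))

lemma aItemStep_nonzero (k : Int) (hk : k ≠ 0) (lst : List (Int × Int)) (ib : PySem.Set Int) :
    aItemStep ib (k, lst) = ib := by
  unfold aItemStep
  apply foldl_const_set
  intro acc j _
  unfold aInsStep
  have : decide (k = 0) = false := by simp [hk]
  simp only [this, Bool.and_false, Bool.false_eq_true, if_false]
  split <;> rfl

lemma itemsFold (ks : List Int) (F : Int → List (Int × Int)) :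
    ∀ (acc : PySem.Set Int), ks.Nodup →
    (ks.map (fun k => (k, F k))).foldl aItemStep acc =
      if 0 ∈ ks then aItemStep acc (0, F 0) else acc := by
  induction ks with
  | nil => intro acc _; simp
  | cons k rest ih =>
    intro acc hnd
    simp only [List.map_cons, List.foldl_cons]
    by_cases hk : k = 0
    · subst hk
      rw [ih _ (List.nodup_cons.1 hnd).2]
      have h0 : (0 : Int) ∉ rest := (List.nodup_cons.1 hnd).1
      rw [if_neg h0, if_pos (by simp)]
    · rw [aItemStep_nonzero k hk, ih _ (List.nodup_cons.1 hnd).2]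
      have : ((0 : Int) ∈ k :: rest) ↔ (0 : Int) ∈ rest := by
        simp [List.mem_cons, Ne.symm hk, hk]
      by_cases h0 : (0 : Int) ∈ rest
      · rw [if_pos h0, if_pos (this.mpr h0)]
      · rw [if_neg h0, if_neg (fun hc => h0 (this.mp hc))]
lemma inner_go (tops : List (Int × Int)) (hpw : tops.Pairwise (fun a b => a.1 < b.1)) :
    ∀ (n : Nat) (a : Int) (acc : List Int),
    ((tops.length : Int) - a).toNat ≤ n → 1 ≤ a →
    (∀ x ∈ acc, ∃ jn : Nat, jn < tops.length ∧ (jn : Int) < a ∧ x = (tops.getD jn (0, 0)).1) →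
    (PySem.List.pyRange a (tops.length : Int) 1).foldl (aInsStep 0 tops) acc =
      (PySem.List.pyRange a (tops.length : Int) 1).foldl (bInsStep tops) acc := by
  intro n
  induction n with
  | zero =>
    intro a acc hn _ _
    rw [PySem.List.pyRange_one_eq_nil (by omega)]
    rfl
  | succ n ih =>
    intro a acc hn ha hinv
    by_cases hlt : a < (tops.length : Int)
    · rw [PySem.List.pyRange_one_cons hlt, List.foldl_cons, List.foldl_cons]
      have hcurr : PySem.List.pyGetD tops a ((0 : Int), (0 : Int)) = tops[a.toNat]'(by omega) :=
        PySem.List.pyGetD_eq_getElem tops _ (by omega) hlt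
      have hnotmem : (PySem.List.pyGetD tops a ((0:Int), (0:Int))).1 ∉ acc := by
        intro hmem
        obtain ⟨jn, hjn, hja, hx⟩ := hinv _ hmem
        have hlt' : (tops.getD jn (0, 0)).1 < (PySem.List.pyGetD tops a ((0:Int), (0:Int))).1 := by
          rw [hcurr, List.getD_eq_getElem tops (0,0) hjn]
          exact List.pairwise_iff_getElem.1 hpw jn a.toNat hjn (by omega) (by omega)
        omega
      have hstep : aInsStep 0 tops acc a = bInsStep tops acc a := by
        simp only [aInsStep, bInsStep, Bool.and_eq_true, Bool.or_eq_true, decide_eq_true_eq]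
        by_cases h1 : (PySem.List.pyGetD tops (a - 1) ((0:Int), (0:Int))).2 + 1 <
            (PySem.List.pyGetD tops a ((0:Int), (0:Int))).1
        · rw [if_pos h1, if_neg (by omega)]
        · rw [if_neg h1]
          by_cases h2 : 2 ≤ (PySem.List.pyGetD tops (a - 1) ((0:Int), (0:Int))).2 -
              (PySem.List.pyGetD tops (a - 1) ((0:Int), (0:Int))).1 ∨
              2 ≤ (PySem.List.pyGetD tops a ((0:Int), (0:Int))).2 -
              (PySem.List.pyGetD tops a ((0:Int), (0:Int))).1
          · rw [if_pos ⟨by omega, trivial⟩, if_pos ⟨by omega, h2⟩]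
            exact PySem.Set.add_of_not_mem hnotmem
          · rw [if_neg (fun hc => h2 (by omega)), if_neg (fun hc => h2 (by omega))]
      rw [hstep]
      have hmono : ∀ x ∈ bInsStep tops acc a, ∃ jn : Nat, jn < tops.length ∧ (jn : Int) < a + 1 ∧
          x = (tops.getD jn (0, 0)).1 := by
        intro x hx
        simp only [bInsStep] at hx
        have hx' : x ∈ acc ∨ x = (PySem.List.pyGetD tops a ((0:Int), (0:Int))).1 := by
          split at hx
          · rcases List.mem_append.1 hx with h | h
            · exact Or.inl h
            · simp at h; exact Or.inr h
          · exact Or.inl hx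
        rcases hx' with h | h
        · obtain ⟨jn, hjn, hja, hxx⟩ := hinv _ h
          exact ⟨jn, hjn, by omega, hxx⟩
        · refine ⟨a.toNat, ?_, ?_, ?_⟩
          · omega
          · omega
          · rw [h, hcurr, List.getD_eq_getElem (n := a.toNat) tops (0,0) (by omega)]
      exact ih (a + 1) _ (by omega) (by omega) hmono
    · rw [PySem.List.pyRange_one_eq_nil (by omega)]
      rfl
lemma inner_eq (tops : List (Int × Int)) (hpw : tops.Pairwise (fun a b => a.1 < b.1)) :
    aItemStep PySem.Set.empty (0, tops) =
      (PySem.List.pyRange 1 (tops.length : Int) 1).foldl (bInsStep tops) [] := by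
  unfold aItemStep
  have hds : PySem.List.sorted tops (fun q => q.1) false = tops :=
    PySem.List.sorted_eq_of_perm_of_pairwise_lt tops tops _ (List.Perm.refl tops) hpw
  simp only [hds]
  exact inner_go tops hpw ((tops.length : Int) - 1).toNat 1 [] le_rfl le_rfl (by simp)
lemma insertBefore_eq (lines : List String) :
    aInsertBefore lines = bInsertBefore lines := by
  simp only [aInsertBefore, bInsertBefore]
  have hinfo : (lines.foldl aInfoStep (0, [])).2 = mkInfo 0 lines := by
    simpa using foldA1 lines 0 []
  rw [hinfo, foldB1 lines 0 0 (-1) []]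
  set infos := mkInfo 0 lines with hinfos
  have hnn : ∀ e ∈ infos, 0 ≤ e.1 ∧ 0 ≤ e.2.1 := mkInfo_nonneg lines 0 le_rfl
  set md := (PySem.List.max? (infos.map (fun info => info.2.1)) (fun x => x)).getD 0 + 1 with hmd
  have hmd1 : 1 ≤ md := by
    rw [hmd]
    rcases hmax : PySem.List.max? (infos.map (fun info => info.2.1)) (fun x => x) with _ | m
    · rw [hmax]; simp
    · rw [hmax]
      have hm := PySem.List.max?_mem hmax
      obtain ⟨e, he, hem⟩ := List.mem_map.1 hm
      have := (hnn e he).2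
      simp only [Option.getD_some]
      omega
  set N := (md + 1).toNat with hN
  have hN0 : 0 < N := by omega
  have hinit : SimInv 0 (List.replicate N (-1)) [] (-1) [] := by
    refine ⟨by simpa using hN0, ?_, rfl, List.Pairwise.nil, by simp, by omega⟩
    rw [PySem.List.pyGetD_zero]
    simp [List.getD, List.getElem?_replicate, hN0]
  have hsim := sim infos 0 (List.replicate N (-1)) [] (-1) [] hnn hinit
  set stA := (PySem.List.enumerate infos 0).foldl aStmtStep (List.replicate N (-1), []) with hstA
  set stB := (PySem.List.enumerate infos 0).foldl bEntryStep (-1, []) with hstB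
  obtain ⟨hlenF, hslotF, hfilF, hpwF, hltF, hopenF⟩ := hsim
  set topsFin := if 0 ≤ stB.1 then stB.2 ++ [(stB.1, (lines.length : Int) - 1)] else stB.2 with htf
  set stmts3 := (PySem.List.pyRange 0 (md + 1) 1).foldl (aFlushStep stA.1 (lines.length : Int)) stA.2 with hstmts3
  have hflush : stmts3.filter (fun t => t.2.2 == 0) =
      topsFin.map (fun q => (q.1, q.2, (0 : Int))) :=
    flush_filter stA.1 (lines.length : Int) (md + 1) (by omega) stB.1 stA.2 stB.2 hslotF hfilF
  have hpwFin : topsFin.Pairwise (fun a b => a.1 < b.1) := by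
    rw [htf]; split
    · exact pw_append _ _ _ hpwF (hopenF (by assumption)).2
    · exact hpwF
  set sorted3 := PySem.List.sorted stmts3 (fun t => t.1) false with hsorted3
  have hfilS : sorted3.filter (fun t => t.2.2 == 0) = topsFin.map (fun q => (q.1, q.2, (0 : Int))) := by
    rw [hsorted3, filter_sorted_eq, hflush]
    rw [hflush]
    exact List.pairwise_map.2 (by simpa using hpwFin)
  have hfold_map : sorted3.foldl aGroupStep PySem.Dict.empty =
      (sorted3.map (fun t => (t.2.2, (t.1, t.2.1)))).foldl
        (fun d p => d.modify p.1 [] (fun l => l ++ [p.2])) PySem.Dict.empty := by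
    rw [List.foldl_map]
    rfl
  have hgetD : (sorted3.foldl aGroupStep PySem.Dict.empty).getD 0 [] = topsFin := by
    rw [hfold_map, PySem.Dict.getD_foldl_modify_append, List.filter_map]
    have hcmp : ((fun p => p.1 == (0 : Int)) ∘ (fun t : Int × Int × Int => (t.2.2, (t.1, t.2.1)))) =
        (fun t : Int × Int × Int => t.2.2 == 0) := rfl
    rw [hcmp, hfilS]
    simp only [List.map_map, List.nil_append]
    exact List.map_id topsFin
  have hkeys : (sorted3.foldl aGroupStep PySem.Dict.empty).keys =
      PySem.Set.ofList (sorted3.map (fun t => t.2.2)) := by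
    have h := PySem.Dict.keys_foldl_modify_key sorted3 (fun t => t.2.2) ([] : List (Int × Int))
      (fun _ t => (fun l => l ++ [(t.1, t.2.1)])) PySem.Dict.empty
    simpa [PySem.Set.update_nil_left] using h
  have hnodup : (sorted3.foldl aGroupStep PySem.Dict.empty).keys.Nodup := by
    rw [hkeys]; exact PySem.Set.nodup_ofList _
  rw [PySem.Dict.items_eq_map_keys _ hnodup ([] : List (Int × Int))]
  rw [itemsFold _ _ _ hnodup, hkeys]
  by_cases h0k : (0 : Int) ∈ PySem.Set.ofList (sorted3.map (fun t => t.2.2))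
  · rw [if_pos h0k, hgetD, inner_eq topsFin hpwFin]
  · rw [if_neg h0k]
    have hne : ∀ t ∈ sorted3, ¬ (t.2.2 == (0 : Int)) = true := by
      intro t ht hc
      exact h0k ((PySem.Set.mem_ofList _ _).2 (List.mem_map.2 ⟨t, ht, by simpa using hc⟩))
    have hnil : topsFin = [] := by
      have : sorted3.filter (fun t => t.2.2 == 0) = [] := List.filter_eq_nil_iff.2 hne
      rw [this] at hfilS
      exact (List.map_eq_nil_iff.1 hfilS.symm)
    rw [hnil]
    rw [show ((List.length ([] : List (Int × Int)) : Int)) = 0 by simp]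
    rw [PySem.List.pyRange_one_eq_nil (by norm_num)]
    rfl

-- ===== VERDICT (by name: the statement is the Claim_ definition above) =====
theorem separate_multiline_stmts_py_spec : Claim_equal_separate_multiline_stmts_py := by
  intro lines _
  unfold Spec_separate_multiline_stmts_py
  unfold separate_multiline_stmts_py separate_multiline_stmts_py_alt
  rw [insertBefore_eq]
  apply PySem.List.foldl_congr_mem
  intro acc p _
  simp [aResStep, bResStep, PySem.Set.contains]
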